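-- pv_equiv track=rewrite | github.com/Sflex0719/SonGharLive | process_playlist.py | create_m3u
-- ===== SOURCE A (Python) =====
-- from collections import defaultdict
--
-- def create_m3u(channels):
--     """Create M3U playlist content with categories"""
--     # Header
--     m3u_content = '''#EXTM3U x-tvg-url="https://www.tsepg.cf/epg.xml.gz"
-- # ===============================
-- #  StreamFlex™ Official Playlist
-- #  AU • Secure • Private
-- #  Join: https://t.me/streamflex19
-- # ===============================
--
-- '''
--
--     # Group channels by category
--     categories = defaultdict(list)
--     for channel in channels:
--         category = channel.get('group_title', 'Entertainment')
--         categories[category].append(channel)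
--
--     # Define category order
--     category_order = ['Entertainment', 'Movies', 'Sports', 'Kids', 'Regional', 'News', 'Music']
--
--     # Add categories in order, then remaining ones alphabetically
--     sorted_categories = [cat for cat in category_order if cat in categories]
--     remaining = sorted([cat for cat in categories.keys() if cat not in category_order])
--     sorted_categories.extend(remaining)
--
--     # Add channels category by category
--     for category in sorted_categories:
--         # Add category separator
--         m3u_content += f'# ========== {category} ==========\n'
--
--         for channel in categories[category]:
--             # Build EXTINF line
--             extinf = "#EXTINF:-1"
--
--             if 'tvg_id' in channel:
--                 extinf += f' tvg-id="{channel["tvg_id"]}"'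
--             if 'tvg_name' in channel:
--                 extinf += f' tvg-name="{channel["tvg_name"]}"'
--             if 'tvg_logo' in channel:
--                 extinf += f' tvg-logo="{channel["tvg_logo"]}"'
--             if 'group_title' in channel:
--                 extinf += f' group-title="{channel["group_title"]}"'
--
--             extinf += f',{channel.get("name", "Unknown")}\n'
--
--             m3u_content += extinf
--             m3u_content += f'{channel.get("url", "")}\n\n'
--
--         # Add spacing between categories
--         m3u_content += '\n'
--
--     # Footer
--     m3u_content += '''# =====================================
-- # Generated by StreamFlex
-- # Thank you
-- # =====================================
-- '''
--
--     return m3u_content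
-- ===== SOURCE B (Python) =====
-- def create_m3u(channels):
--     """Create M3U playlist content with categories (single join, filter per category)."""
--     header = '''#EXTM3U x-tvg-url="https://www.tsepg.cf/epg.xml.gz"
-- # ===============================
-- #  StreamFlex™ Official Playlist
-- #  AU • Secure • Private
-- #  Join: https://t.me/streamflex19
-- # ===============================
--
-- '''
--     footer = '''# =====================================
-- # Generated by StreamFlex
-- # Thank you
-- # =====================================
-- '''
--     order = ['Entertainment', 'Movies', 'Sports', 'Kids', 'Regional', 'News', 'Music']
--     attr_keys = [('tvg_id', 'tvg-id'), ('tvg_name', 'tvg-name'),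
--                  ('tvg_logo', 'tvg-logo'), ('group_title', 'group-title')]
--
--     def cat_of(ch):
--         return ch.get('group_title', 'Entertainment')
--
--     def line_of(ch):
--         attrs = ''.join(f' {m}="{ch[k]}"' for k, m in attr_keys if k in ch)
--         return f'#EXTINF:-1{attrs},{ch.get("name", "Unknown")}\n'
--
--     seen = []
--     for ch in channels:
--         c = cat_of(ch)
--         if c not in seen:
--             seen.append(c)
--     cats = [c for c in order if c in seen] + sorted(c for c in seen if c not in order)
--
--     parts = [header]
--     for cat in cats:
--         parts.append(f'# ========== {cat} ==========\n')
--         for ch in channels: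
--             if cat_of(ch) == cat:
--                 parts.append(line_of(ch))
--                 parts.append(ch.get('url', '') + '\n\n')
--         parts.append('\n')
--     parts.append(footer)
--     return ''.join(parts)
-- ===== Notes on version B (the rewrite author's own statement) =====
-- stated objective: alternative
-- what changed: B drops the defaultdict grouping and string-+= accumulation: it collects the distinct categories in one first-seen scan, emits each category's channels by filtering the original list, builds the EXTINF attributes by joining a key table instead of four chained += ifs, and assembles the whole playlist with a single ''.join over a parts list.
import Mathlib
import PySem

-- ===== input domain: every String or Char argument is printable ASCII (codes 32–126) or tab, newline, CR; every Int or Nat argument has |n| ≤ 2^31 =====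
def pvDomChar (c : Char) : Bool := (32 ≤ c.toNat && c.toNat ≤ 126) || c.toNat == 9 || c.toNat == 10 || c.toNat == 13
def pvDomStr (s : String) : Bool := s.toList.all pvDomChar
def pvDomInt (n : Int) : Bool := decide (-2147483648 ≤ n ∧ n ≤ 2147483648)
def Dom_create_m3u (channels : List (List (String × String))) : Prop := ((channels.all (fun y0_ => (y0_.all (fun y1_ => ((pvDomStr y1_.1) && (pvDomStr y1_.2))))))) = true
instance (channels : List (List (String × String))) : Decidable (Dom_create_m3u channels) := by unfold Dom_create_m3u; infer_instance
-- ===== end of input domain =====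

-- B replaces A's defaultdict grouping and string-+= accumulation by a distinct-category scan,
-- a per-category filter of the original list, and a single String.join of the emitted pieces
-- (objective: alternative decomposition, same result).

-- shared literal data (the header/footer/orders are fixed text of the task)
def pvHeader : String := "#EXTM3U x-tvg-url=\"https://www.tsepg.cf/epg.xml.gz\"\n# ===============================\n#  StreamFlex™ Official Playlist\n#  AU • Secure • Private\n#  Join: https://t.me/streamflex19\n# ===============================\n\n"
def pvFooter : String := "# =====================================\n# Generated by StreamFlex\n# Thank you\n# =====================================\n"
def pvOrder : List String := ["Entertainment", "Movies", "Sports", "Kids", "Regional", "News", "Music"]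

-- ===== PORT A =====
-- A's EXTINF build: successive += behind four 'in' tests
def pvExtinfA (ch : List (String × String)) : String :=
  let d := PySem.Dict.mk ch
  let e := "#EXTINF:-1"
  let e := if d.contains "tvg_id" then e ++ " tvg-id=\"" ++ d.getD "tvg_id" "" ++ "\"" else e
  let e := if d.contains "tvg_name" then e ++ " tvg-name=\"" ++ d.getD "tvg_name" "" ++ "\"" else e
  let e := if d.contains "tvg_logo" then e ++ " tvg-logo=\"" ++ d.getD "tvg_logo" "" ++ "\"" else e
  let e := if d.contains "group_title" then e ++ " group-title=\"" ++ d.getD "group_title" "" ++ "\"" else e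
  e ++ "," ++ d.getD "name" "Unknown" ++ "\n"

def create_m3u (channels : List (List (String × String))) : String :=
  -- categories = defaultdict(list); categories[ch.get('group_title','Entertainment')].append(ch)
  let categories : PySem.Dict String (List (List (String × String))) :=
    channels.foldl
      (fun d ch => d.modify ((PySem.Dict.mk ch).getD "group_title" "Entertainment") [] (· ++ [ch]))
      PySem.Dict.empty
  let sorted_categories :=
    pvOrder.filter (fun c => categories.contains c)
      ++ PySem.List.sorted (categories.keys.filter (fun c => !(pvOrder.contains c))) id
  let body := sorted_categories.foldl
    (fun acc cat =>
      ((categories.getD cat []).foldl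
          (fun acc ch => acc ++ pvExtinfA ch ++ ((PySem.Dict.mk ch).getD "url" "" ++ "\n\n"))
          (acc ++ ("# ========== " ++ cat ++ " ==========\n"))) ++ "\n")
    pvHeader
  body ++ pvFooter

-- ===== PORT B =====
def pvAttrKeys : List (String × String) :=
  [("tvg_id", "tvg-id"), ("tvg_name", "tvg-name"), ("tvg_logo", "tvg-logo"), ("group_title", "group-title")]

def pvCatB (ch : List (String × String)) : String :=
  (PySem.Dict.mk ch).getD "group_title" "Entertainment"

-- B's EXTINF build: ''.join over the present attributes of a key table
def pvLineB (ch : List (String × String)) : String :=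
  let d := PySem.Dict.mk ch
  "#EXTINF:-1"
    ++ String.join ((pvAttrKeys.filter (fun p => d.contains p.1)).map
        (fun p => " " ++ p.2 ++ "=\"" ++ d.getD p.1 "" ++ "\""))
    ++ "," ++ d.getD "name" "Unknown" ++ "\n"

def create_m3u_alt (channels : List (List (String × String))) : String :=
  let seen : PySem.Set String := channels.foldl (fun s ch => PySem.Set.add s (pvCatB ch)) PySem.Set.empty
  let cats := pvOrder.filter (fun c => PySem.Set.contains seen c)
      ++ PySem.List.sorted (seen.filter (fun c => !(pvOrder.contains c))) id
  let parts := [pvHeader]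
    ++ cats.flatMap (fun cat =>
        ("# ========== " ++ cat ++ " ==========\n")
          :: ((channels.filter (fun ch => pvCatB ch == cat)).flatMap
                (fun ch => [pvLineB ch, (PySem.Dict.mk ch).getD "url" "" ++ "\n\n"])
              ++ ["\n"]))
    ++ [pvFooter]
  String.join parts

-- ===== PRECONDITION & SPEC =====
def Spec_create_m3u (channels : List (List (String × String))) (out : String) : Prop := out = create_m3u_alt channels
instance (channels : List (List (String × String))) (out : String) : Decidable (Spec_create_m3u channels out) := by unfold Spec_create_m3u; infer_instance

-- ===== CLAIM (what is proved, stated in full; the proofs are below) =====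
def Claim_equal_create_m3u : Prop := ∀ (channels : List (List (String × String))), Dom_create_m3u channels → Spec_create_m3u channels (create_m3u channels)

-- ===== LEMMAS AND PROOFS =====

-- the two EXTINF builders agree
theorem pvExtinf_eq (ch : List (String × String)) : pvExtinfA ch = pvLineB ch := by
  simp only [pvExtinfA, pvLineB, pvAttrKeys, List.filter]
  split_ifs <;> simp [*, String.join, String.append_assoc] <;>
    simp [← String.toList_inj, String.toList_append]

theorem pv_map_snd_filter_fst (key : List (String × String) → String) (c : String)
    (l : List (List (String × String))) :
    ((l.map (fun x => (key x, x))).filter (fun p => p.1 == c)).map (fun x => x.2)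
      = l.filter (fun x => key x == c) := by
  induction l with
  | nil => simp
  | cons a t ih => by_cases h : key a == c <;> simp [h, ih]

-- A's grouping dict looks up to a filter of the original list
theorem pv_getD_eq (channels : List (List (String × String))) (c : String) :
    (channels.foldl
      (fun d ch => d.modify ((PySem.Dict.mk ch).getD "group_title" "Entertainment") [] (· ++ [ch]))
      PySem.Dict.empty).getD c []
    = channels.filter (fun ch => pvCatB ch == c) := by
  have h2 : channels.foldl
      (fun d ch => d.modify ((PySem.Dict.mk ch).getD "group_title" "Entertainment") [] (· ++ [ch]))
      PySem.Dict.empty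
    = (channels.map (fun ch => (pvCatB ch, ch))).foldl
        (fun d p => d.modify p.1 [] (· ++ [p.2])) PySem.Dict.empty := by
    rw [List.foldl_map]; simp [pvCatB]
  rw [h2, PySem.Dict.getD_foldl_modify_append, pv_map_snd_filter_fst pvCatB]
  simp

-- A's key list is B's 'seen' list
theorem pv_keys_eq (channels : List (List (String × String))) :
    (channels.foldl
      (fun d ch => d.modify ((PySem.Dict.mk ch).getD "group_title" "Entertainment") [] (· ++ [ch]))
      PySem.Dict.empty).keys
    = channels.foldl (fun s ch => PySem.Set.add s (pvCatB ch)) PySem.Set.empty := by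
  have h := PySem.Dict.keys_foldl_modify_key channels (fun ch => pvCatB ch) []
      (fun _ ch => (· ++ [ch])) PySem.Dict.empty
  simp only [pvCatB] at h ⊢
  rw [h, ← PySem.Set.update_map_eq_foldl_add]
  simp [PySem.Dict.keys_empty, PySem.Set.empty]

theorem pv_join_cons (s : String) (l : List String) : String.join (s :: l) = s ++ String.join l := by
  simp [String.join_eq]

theorem pv_join_nil : String.join ([] : List String) = "" := rfl

theorem pv_join_append (l₁ l₂ : List String) :
    String.join (l₁ ++ l₂) = String.join l₁ ++ String.join l₂ := by
  induction l₁ with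
  | nil => simp [String.join]
  | cons s t ih => simp [pv_join_cons, ih, String.append_assoc]

-- inner loop: A's += over one category's channels = B's joined pieces
theorem pv_inner (group : List (List (String × String))) (acc : String) :
    group.foldl (fun acc ch => acc ++ pvExtinfA ch ++ ((PySem.Dict.mk ch).getD "url" "" ++ "\n\n")) acc
    = acc ++ String.join (group.flatMap (fun ch => [pvLineB ch, (PySem.Dict.mk ch).getD "url" "" ++ "\n\n"])) := by
  induction group generalizing acc with
  | nil => simp [String.join]
  | cons ch rest ih =>
      simp only [List.foldl_cons, List.flatMap_cons, List.cons_append, pv_join_cons]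
      rw [ih, pvExtinf_eq]
      simp [String.append_assoc]

-- outer loop: A's category fold = B's joined blocks
theorem pv_outer (channels : List (List (String × String))) (cats : List String) (acc : String) :
    cats.foldl
      (fun acc cat =>
        (((channels.foldl
            (fun d ch => d.modify ((PySem.Dict.mk ch).getD "group_title" "Entertainment") [] (· ++ [ch]))
            PySem.Dict.empty).getD cat []).foldl
            (fun acc ch => acc ++ pvExtinfA ch ++ ((PySem.Dict.mk ch).getD "url" "" ++ "\n\n"))
            (acc ++ ("# ========== " ++ cat ++ " ==========\n"))) ++ "\n")
      acc
    = acc ++ String.join (cats.flatMap (fun cat =>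
        ("# ========== " ++ cat ++ " ==========\n")
          :: ((channels.filter (fun ch => pvCatB ch == cat)).flatMap
                (fun ch => [pvLineB ch, (PySem.Dict.mk ch).getD "url" "" ++ "\n\n"])
              ++ ["\n"]))) := by
  induction cats generalizing acc with
  | nil => simp [String.join]
  | cons cat rest ih =>
      simp only [List.foldl_cons]
      rw [ih, pv_getD_eq, pv_inner]
      simp [List.flatMap_cons, List.cons_append, pv_join_cons, pv_join_append,
        String.append_assoc]

-- ===== VERDICT (by name: the statement is the Claim_ definition above) =====
theorem create_m3u_spec : Claim_equal_create_m3u := by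
  intro channels _
  unfold Spec_create_m3u create_m3u create_m3u_alt
  simp only [PySem.Dict.contains_eq_decide_mem_keys, pv_keys_eq]
  rw [pv_outer]
  simp [List.flatMap_append, pv_join_cons, pv_join_append, pv_join_nil,
    String.append_assoc, PySem.Set.contains_eq_listContains]
  congr 1
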